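-- pv_equiv track=rewrite | github.com/yuichiinumaru/overpowers | scripts/utils/move_completed_batches.py | is_fully_completed
-- ===== SOURCE A (Python) =====
-- def is_fully_completed(content):
--     lines = content.split('\n')
--     has_checked_subtask = False
--     for line in lines:
--         stripped = line.strip()
--         # Look for subtasks, typically starting with "- [ ]" or "- [x]"
--         if stripped.startswith('- [ ]') or stripped.startswith('- [  ]'):
--             return False # Found an incomplete task
--         if stripped.startswith('- [x]') or stripped.startswith('- [X]'):
--             has_checked_subtask = True
--
--     # Return true only if we found checked tasks and no unchecked tasks
--     return has_checked_subtask
-- ===== SOURCE B (Python) =====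
-- def is_fully_completed(content):
--     lines = content.split('\n')
--     def stripped(line):
--         return line.strip()
--     has_incomplete = any(stripped(l).startswith(('- [ ]', '- [  ]')) for l in lines)
--     has_checked = any(stripped(l).startswith(('- [x]', '- [X]')) for l in lines)
--     return has_checked and not has_incomplete
-- ===== Notes on version B (the rewrite author's own statement) =====
-- stated objective: simpler
-- what changed: Replaces the single stateful loop with early return and a mutable flag by two declarative any() scans (has_incomplete, has_checked) combined as has_checked and not has_incomplete.
import Mathlib
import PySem

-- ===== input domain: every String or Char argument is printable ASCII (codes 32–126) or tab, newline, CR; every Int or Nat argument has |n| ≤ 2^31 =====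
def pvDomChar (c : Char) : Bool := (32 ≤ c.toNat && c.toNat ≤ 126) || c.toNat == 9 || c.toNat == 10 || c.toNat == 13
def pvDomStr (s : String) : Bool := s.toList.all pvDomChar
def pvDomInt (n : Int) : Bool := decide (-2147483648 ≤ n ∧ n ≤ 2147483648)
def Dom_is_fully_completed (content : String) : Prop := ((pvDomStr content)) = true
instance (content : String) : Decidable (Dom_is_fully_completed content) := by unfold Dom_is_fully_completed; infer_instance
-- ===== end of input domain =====

-- B replaces A's single early-return loop with a mutable flag by two declarative any-scans
-- (has_incomplete / has_checked) combined as 'has_checked && !has_incomplete' (objective: simpler).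

-- ===== PORT A =====
-- the for-loop with its early 'return False' and the has_checked_subtask flag
def isfcLoopA (lines : List String) (hasChecked : Bool) : Bool :=
  match lines with
  | [] => hasChecked
  | line :: rest =>
    let stripped := PySem.Str.strip line
    if PySem.Str.startswith stripped "- [ ]" || PySem.Str.startswith stripped "- [  ]" then
      false
    else if PySem.Str.startswith stripped "- [x]" || PySem.Str.startswith stripped "- [X]" then
      isfcLoopA rest true
    else
      isfcLoopA rest hasChecked

def is_fully_completed (content : String) : Bool :=
  isfcLoopA ((PySem.Str.split? content "\n").getD []) false

-- ===== PORT B =====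
def isfcIncomplete (line : String) : Bool :=
  let s := PySem.Str.strip line
  PySem.Str.startswith s "- [ ]" || PySem.Str.startswith s "- [  ]"

def isfcChecked (line : String) : Bool :=
  let s := PySem.Str.strip line
  PySem.Str.startswith s "- [x]" || PySem.Str.startswith s "- [X]"

def is_fully_completed_alt (content : String) : Bool :=
  let lines := (PySem.Str.split? content "\n").getD []
  lines.any isfcChecked && !(lines.any isfcIncomplete)

-- ===== PRECONDITION & SPEC =====
def Spec_is_fully_completed (content : String) (out : Bool) : Prop := out = is_fully_completed_alt content
instance (content : String) (out : Bool) : Decidable (Spec_is_fully_completed content out) := by unfold Spec_is_fully_completed; infer_instance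

-- ===== CLAIM (what is proved, stated in full; the proofs are below) =====
def Claim_equal_is_fully_completed : Prop := ∀ (content : String), Dom_is_fully_completed content → Spec_is_fully_completed content (is_fully_completed content)

-- ===== LEMMAS AND PROOFS =====
theorem isfcLoopA_eq (lines : List String) (b : Bool) :
    isfcLoopA lines b = ((b || lines.any isfcChecked) && !(lines.any isfcIncomplete)) := by
  induction lines generalizing b with
  | nil => simp [isfcLoopA]
  | cons l rest ih =>
    have hstep : isfcLoopA (l :: rest) b =
        (if isfcIncomplete l then false
         else if isfcChecked l then isfcLoopA rest true else isfcLoopA rest b) := rfl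
    rw [hstep]
    cases hI : isfcIncomplete l <;> cases hC : isfcChecked l <;>
      simp [hI, hC, ih, Bool.or_assoc]

-- ===== VERDICT (by name: the statement is the Claim_ definition above) =====
theorem is_fully_completed_spec : Claim_equal_is_fully_completed := by
  intro content _
  unfold Spec_is_fully_completed is_fully_completed is_fully_completed_alt
  simp [isfcLoopA_eq]
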